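-- pv_equiv track=rewrite | github.com/momo-dev1/electro_zone | electro_zone/electro_zone/doctype/platform_order/platform_order.py | filter_columns_by_platform
-- ===== SOURCE A (Python) =====
-- PLATFORM_EXCEL_MAPPINGS = {
--     # "Amazon": {
--     #     "order_number": "amazon-order-id",
--     #     "platform_date": "purchase-date",
--     #     "platform_sku": "asin",
--     #     "quantity": "quantity",
--     #     "unit_price": "item-price",
--     #     "shipping_price": "shipping-price",
--     #     "ship_promotion_discount": "ship-promotion-discount",
--     #     "status_filter": None,
--     #     "status_value": None,
--     #     "default_qty": None,
--     # },
--     # "Noon": {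
--     #     "order_number": "purchase_item_nr",
--     #     "platform_date": "fulfillment_timestamp",
--     #     "platform_sku": "sku",
--     #     "quantity": "quantity",
--     #     "status_filter": "order_status",
--     #     "status_value": None,
--     #     "default_qty": None,
--     # },
--     # "Jumia": {
--     #     "order_number": "Order Number",
--     #     "platform_date": "Updated At",
--     #     "platform_sku": "Sku",
--     #     "unit_price": "Unit Price",
--     #     "shipping_fees": "Shipping Fee",
--     #     "customer_first_name": "Customer First Name",
--     #     "customer_last_name": "Customer Last Name",
--     #     "status_filter": "Status",
--     #     "status_value": "ready to ship",
--     #     "default_qty": 1,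
--     # },
--     "Homzmart": {
--         "order_number": ["orderId", "itemid"],  # Concatenated
--         "purchase_date": "addedDate",
--         "platform_sku": "itemSku",
--         "quantity": "itemQty",
--         "unit_price": "itemPrice",
--         "shipping_collection": "itemShippingFees",
--         "shipping_fees": "itemShippingFees",
--         "cod_collection": "cod_fees",
--         "cod_fees": "cod_fees",
--         "cash_collection": "itemGrandTotal",
--         "customer_name": "customerName",
--         "mobile_number": "customerMobile",
--         "address": "customer_address",
--         "city": "customer_region",
--         "region": "customer_city",
--         "status_filter": "status",
--         "status_value": "ready to ship",
--     },
-- }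
--
-- def filter_columns_by_platform(row, platform):
--     """
--     Filter row to only include columns defined in platform mapping
--
--     Args:
--         row: Dictionary of all columns from Excel
--         platform: Detected platform name
--
--     Returns:
--         dict: Filtered row with only relevant columns
--     """
--     if not platform or platform not in PLATFORM_EXCEL_MAPPINGS:
--         return row
--
--     mapping = PLATFORM_EXCEL_MAPPINGS[platform]
--     filtered_row = {}
--
--     # Keep standard column if exists
--     if "Platform" in row:
--         filtered_row["Platform"] = row["Platform"]
--
--     # Include only mapped columns
--     for field_name, column_name in mapping.items():
--         if field_name.startswith("status_") or field_name.startswith("default_"):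
--             continue  # Skip config keys
--
--         if isinstance(column_name, list):
--             # Handle concatenated columns (Homzmart)
--             for col in column_name:
--                 if col in row:
--                     filtered_row[col] = row[col]
--         elif column_name and column_name in row:
--             filtered_row[column_name] = row[column_name]
--
--     return filtered_row
-- ===== SOURCE B (Python) =====
-- PLATFORM_EXCEL_MAPPINGS = {
--     "Homzmart": {
--         "order_number": ["orderId", "itemid"],  # Concatenated
--         "purchase_date": "addedDate",
--         "platform_sku": "itemSku",
--         "quantity": "itemQty",
--         "unit_price": "itemPrice",
--         "shipping_collection": "itemShippingFees",
--         "shipping_fees": "itemShippingFees",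
--         "cod_collection": "cod_fees",
--         "cod_fees": "cod_fees",
--         "cash_collection": "itemGrandTotal",
--         "customer_name": "customerName",
--         "mobile_number": "customerMobile",
--         "address": "customer_address",
--         "city": "customer_region",
--         "region": "customer_city",
--         "status_filter": "status",
--         "status_value": "ready to ship",
--     },
-- }
--
--
-- def _column_ranks(mapping):
--     """Output rank of each relevant source column (module-level, computed once)."""
--     ranks = {"Platform": 0}
--     for field, value in mapping.items():
--         if field.startswith(("status_", "default_")):
--             continue
--         for col in (value if isinstance(value, list) else [value]):
--             if col and col not in ranks:
--                 ranks[col] = len(ranks)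
--     return ranks
--
--
-- _RANKS = {p: _column_ranks(m) for p, m in PLATFORM_EXCEL_MAPPINGS.items()}
--
--
-- def filter_columns_by_platform(row, platform):
--     """Filter row to platform-mapped columns, driven by the row's own keys."""
--     if not platform or platform not in PLATFORM_EXCEL_MAPPINGS:
--         return row
--     ranks = _RANKS[platform]
--     keys = sorted(row.keys() & ranks.keys(), key=ranks.get)
--     return {k: row[k] for k in keys}
-- ===== Notes on version B (the rewrite author's own statement) =====
-- stated objective: alternative
-- what changed: A drives the per-call loop over the platform mapping with nested branching (prefix skips, list flattening, 'Platform' special case) mutating a dict; B precomputes a column->output-rank table once at module level and per call iterates over the row's own keys: intersect row.keys() with the rank table's keys, sort by rank, and build the result from that sorted key list.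
import Mathlib
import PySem

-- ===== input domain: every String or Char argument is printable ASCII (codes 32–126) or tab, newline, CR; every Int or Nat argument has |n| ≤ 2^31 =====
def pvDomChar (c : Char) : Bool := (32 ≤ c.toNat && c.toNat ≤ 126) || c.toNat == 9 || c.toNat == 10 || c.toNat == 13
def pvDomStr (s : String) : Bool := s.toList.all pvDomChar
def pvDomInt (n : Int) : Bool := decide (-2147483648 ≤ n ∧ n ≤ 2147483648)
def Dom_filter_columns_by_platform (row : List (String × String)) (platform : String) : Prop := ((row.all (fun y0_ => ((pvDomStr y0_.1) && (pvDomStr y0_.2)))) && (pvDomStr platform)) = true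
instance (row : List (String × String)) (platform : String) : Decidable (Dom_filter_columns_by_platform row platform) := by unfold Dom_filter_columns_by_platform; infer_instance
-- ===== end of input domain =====

-- B is row-driven instead of mapping-driven: a rank table (column → output position) is built once at
-- module level; each call selects the row's own keys that have a rank, sorts them by rank and builds the
-- result from that (objective: alternative decomposition, same cost). Return-value equivalence only.

-- ===== PORT A =====
-- a mapping value is either a single column name or a list of column names
inductive PvColVal where
  | s : String → PvColVal
  | l : List String → PvColVal
deriving DecidableEq, Repr

def pvMapHomzmart : List (String × PvColVal) := [
  ("order_number", .l ["orderId", "itemid"]),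
  ("purchase_date", .s "addedDate"),
  ("platform_sku", .s "itemSku"),
  ("quantity", .s "itemQty"),
  ("unit_price", .s "itemPrice"),
  ("shipping_collection", .s "itemShippingFees"),
  ("shipping_fees", .s "itemShippingFees"),
  ("cod_collection", .s "cod_fees"),
  ("cod_fees", .s "cod_fees"),
  ("cash_collection", .s "itemGrandTotal"),
  ("customer_name", .s "customerName"),
  ("mobile_number", .s "customerMobile"),
  ("address", .s "customer_address"),
  ("city", .s "customer_region"),
  ("region", .s "customer_city"),
  ("status_filter", .s "status"),
  ("status_value", .s "ready to ship")]

def pvMappings : List (String × List (String × PvColVal)) := [("Homzmart", pvMapHomzmart)]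

-- first-match lookup in the row association list ('col in row' / 'row[col]')
def pvLookup (row : List (String × String)) (k : String) : Option String :=
  (row.find? (fun p => p.1 == k)).map (·.2)

-- 'if col in row: filtered_row[col] = row[col]'
def pvInsertIfPresent (row : List (String × String)) (d : PySem.Dict String String) (c : String) : PySem.Dict String String :=
  match pvLookup row c with
  | some v => d.insert c v
  | none => d

def filter_columns_by_platform (row : List (String × String)) (platform : String) : List (String × String) :=
  if platform = "" ∨ (pvMappings.find? (fun p => p.1 == platform)) = none then row
  else
    let mapping := ((pvMappings.find? (fun p => p.1 == platform)).map (·.2)).getD []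
    let d0 : PySem.Dict String String :=
      match pvLookup row "Platform" with
      | some v => (PySem.Dict.empty).insert "Platform" v
      | none => PySem.Dict.empty
    (mapping.foldl (fun d fc =>
      if PySem.Str.startswith fc.1 "status_" || PySem.Str.startswith fc.1 "default_" then d
      else match fc.2 with
        | .l cols => cols.foldl (fun d c => pvInsertIfPresent row d c) d
        | .s c => if c ≠ "" then pvInsertIfPresent row d c else d) d0).items

-- ===== PORT B =====
-- _column_ranks(mapping): output rank of each relevant source column ('Platform' first)
def pvColumnRanks (mapping : List (String × PvColVal)) : PySem.Dict String Nat :=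
  mapping.foldl (fun r fc =>
    if PySem.Str.startswith fc.1 "status_" || PySem.Str.startswith fc.1 "default_" then r
    else (match fc.2 with | .l cs => cs | .s c => [c]).foldl
      (fun r c => if c ≠ "" ∧ r.contains c = false then r.insert c r.size else r) r)
    ((PySem.Dict.empty).insert "Platform" 0)

-- _RANKS (module-level, computed once)
def pvRanksTbl : List (String × PySem.Dict String Nat) := [("Homzmart", pvColumnRanks pvMapHomzmart)]

def filter_columns_by_platform_alt (row : List (String × String)) (platform : String) : List (String × String) :=
  if platform = "" ∨ (pvMappings.find? (fun p => p.1 == platform)) = none then row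
  else
    let ranks := ((pvRanksTbl.find? (fun p => p.1 == platform)).map (·.2)).getD PySem.Dict.empty
    -- keys = sorted(row.keys() & ranks.keys(), key=ranks.get) — the set's order is erased by the sort
    let keys := PySem.List.sorted
      (PySem.Set.inter (PySem.Set.ofList (row.map Prod.fst)) ranks.keys)
      (fun k => (ranks.get? k).getD 0) false
    -- {k: row[k] for k in keys}; every k is one of row's keys, so row[k] is its (first) value
    (keys.foldl (fun d k => d.insert k ((pvLookup row k).getD "")) PySem.Dict.empty).items

-- ===== PRECONDITION & SPEC =====
def Spec_filter_columns_by_platform (row : List (String × String)) (platform : String) (out : List (String × String)) : Prop := out = filter_columns_by_platform_alt row platform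
instance (row : List (String × String)) (platform : String) (out : List (String × String)) : Decidable (Spec_filter_columns_by_platform row platform out) := by unfold Spec_filter_columns_by_platform; infer_instance

-- ===== CLAIM (what is proved, stated in full; the proofs are below) =====
def Claim_equal_filter_columns_by_platform : Prop := ∀ (row : List (String × String)) (platform : String), Dom_filter_columns_by_platform row platform → Spec_filter_columns_by_platform row platform (filter_columns_by_platform row platform)

-- ===== LEMMAS AND PROOFS =====

-- the source-column names A's loop visits, in order (with the duplicates), and their dedup
def pvK : List String := ["orderId", "itemid", "addedDate", "itemSku", "itemQty", "itemPrice",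
  "itemShippingFees", "itemShippingFees", "cod_fees", "cod_fees", "itemGrandTotal",
  "customerName", "customerMobile", "customer_address", "customer_region", "customer_city"]

def pvW : List String := ["orderId", "itemid", "addedDate", "itemSku", "itemQty", "itemPrice",
  "itemShippingFees", "cod_fees", "itemGrandTotal",
  "customerName", "customerMobile", "customer_address", "customer_region", "customer_city"]

-- the full output column order B's rank table encodes
def pvOrder : List String := "Platform" :: pvW

-- d0 of A's loop, as a named value
def pvD0 (row : List (String × String)) : PySem.Dict String String :=
  match pvLookup row "Platform" with
  | some v => (PySem.Dict.empty).insert "Platform" v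
  | none => PySem.Dict.empty

-- dedup of a key list relative to an already-seen list
def pvDedupRel (seen : List String) : List String → List String
  | [] => []
  | k :: ks => if k ∈ seen then pvDedupRel seen ks else k :: pvDedupRel (k :: seen) ks

theorem pvDedupRel_congr (ks : List String) : ∀ (s1 s2 : List String),
    (∀ x, x ∈ s1 ↔ x ∈ s2) → pvDedupRel s1 ks = pvDedupRel s2 ks := by
  induction ks with
  | nil => intro s1 s2 _; rfl
  | cons k ks ih =>
    intro s1 s2 h
    simp only [pvDedupRel]
    by_cases hk : k ∈ s1
    · rw [if_pos hk, if_pos ((h k).mp hk), ih s1 s2 h]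
    · rw [if_neg hk, if_neg (fun hc => hk ((h k).mpr hc))]
      congr 1
      refine ih _ _ (fun x => ?_)
      simp [List.mem_cons, h x]

-- adding a key with no row value to 'seen' does not change the filtered dedup
theorem pvDedupRel_drop_none (row : List (String × String)) (k : String)
    (hk : pvLookup row k = none) (ks : List String) : ∀ (s1 s2 : List String),
    (∀ x, x ∈ s1 ↔ x = k ∨ x ∈ s2) →
    (pvDedupRel s1 ks).filterMap (fun c => (pvLookup row c).map (fun v => (c, v)))
      = (pvDedupRel s2 ks).filterMap (fun c => (pvLookup row c).map (fun v => (c, v))) := by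
  induction ks with
  | nil => intro s1 s2 _; rfl
  | cons j ks ih =>
    intro s1 s2 h
    simp only [pvDedupRel]
    by_cases hjk : j = k
    · subst hjk
      rw [if_pos ((h j).mpr (Or.inl rfl))]
      by_cases hj2 : j ∈ s2
      · rw [if_pos hj2]; exact ih s1 s2 h
      · rw [if_neg hj2]
        have : (pvDedupRel s1 ks).filterMap (fun c => (pvLookup row c).map (fun v => (c, v)))
            = (pvDedupRel (j :: s2) ks).filterMap (fun c => (pvLookup row c).map (fun v => (c, v))) := by
          refine ih s1 (j :: s2) (fun x => ?_)
          simp [List.mem_cons, h x]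
        rw [this, List.filterMap_cons]
        simp [hk]
    · by_cases hj2 : j ∈ s2
      · rw [if_pos ((h j).mpr (Or.inr hj2)), if_pos hj2]; exact ih s1 s2 h
      · rw [if_neg (fun hc => by rcases (h j).mp hc with h1 | h2; exact hjk h1; exact hj2 h2),
            if_neg hj2]
        have htail := ih (j :: s1) (j :: s2) (fun x => by
          by_cases hx : x = j <;> simp [List.mem_cons, hx, h x])
        simp only [List.filterMap_cons, htail]

-- overwriting every pair whose key is k with the pair (k, v) it already contains is the identity
theorem pvMapIf_eq (k v : String) : ∀ (l : List (String × String)),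
    (l.map Prod.fst).Nodup → (k, v) ∈ l →
    l.map (fun p => if p.1 == k then (k, v) else p) = l := by
  intro l
  induction l with
  | nil => intro _ h; cases h
  | cons p l ih =>
    intro hnd hmem
    rw [List.map_cons] at hnd ⊢
    have hnd1 : p.1 ∉ l.map Prod.fst := (List.nodup_cons.mp hnd).1
    have hnd2 : (l.map Prod.fst).Nodup := (List.nodup_cons.mp hnd).2
    by_cases hpk : p.1 = k
    · have hp : p = (k, v) := by
        rcases List.mem_cons.mp hmem with h1 | h2
        · exact h1.symm
        · exact absurd (hpk ▸ List.mem_map_of_mem h2 (f := Prod.fst)) hnd1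
      have htl : l.map (fun p => if p.1 == k then (k, v) else p) = l := by
        refine List.map_congr_left (fun q hq => ?_) |>.trans (List.map_id l)
        have : q.1 ≠ k := fun hqk => hnd1 (hpk ▸ hqk ▸ List.mem_map_of_mem hq (f := Prod.fst))
        simp [this]
      rw [htl, if_pos (by simp [hpk]), hp]
    · rcases List.mem_cons.mp hmem with h1 | h2
      · exact absurd (congrArg Prod.fst h1.symm) hpk
      · rw [if_neg (by simp [hpk]), ih hnd2 h2]

-- inserting a key with the value it already has leaves the dict unchanged
theorem pvInsert_same (d : PySem.Dict String String) (k v : String)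
    (hnd : d.keys.Nodup) (h : d.get? k = some v) : d.insert k v = d := by
  apply PySem.Dict.ext
  have hc : d.contains k = true := by
    rw [PySem.Dict.contains_eq_isSome_get?, h]; rfl
  rw [PySem.Dict.items_insert_of_contains d v hc]
  exact pvMapIf_eq k v d.items hnd (PySem.Dict.mem_items_of_get?_eq_some d h)

-- A's main loop invariant: folding pvInsertIfPresent appends the deduped found pairs
theorem pvMain (row : List (String × String)) : ∀ (ks : List String) (d : PySem.Dict String String),
    d.keys.Nodup → (∀ k v, d.get? k = some v → pvLookup row k = some v) →
    (ks.foldl (pvInsertIfPresent row) d).items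
      = d.items ++ (pvDedupRel d.keys ks).filterMap (fun c => (pvLookup row c).map (fun v => (c, v))) := by
  intro ks
  induction ks with
  | nil => intro d _ _; simp [pvDedupRel]
  | cons k ks ih =>
    intro d hnd hval
    simp only [List.foldl_cons, pvDedupRel]
    by_cases hk : k ∈ d.keys
    · rw [if_pos hk]
      cases h : pvLookup row k with
      | none =>
        have : pvInsertIfPresent row d k = d := by simp [pvInsertIfPresent, h]
        rw [this, ih d hnd hval]
      | some v =>
        obtain ⟨w, hw⟩ : ∃ w, d.get? k = some w := by
          rcases ho : d.get? k with _ | w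
          · have hcf := (PySem.Dict.get?_eq_none_iff_contains d k).mp ho
            have hct := (PySem.Dict.contains_iff_mem_keys d k).mpr hk
            simp [hct] at hcf
          · exact ⟨w, rfl⟩
        have hwv : w = v := by
          have := hval k w hw; rw [h] at this; exact (Option.some_inj.mp this).symm
        have : pvInsertIfPresent row d k = d := by
          simp only [pvInsertIfPresent, h]
          exact pvInsert_same d k v hnd (hwv ▸ hw)
        rw [this, ih d hnd hval]
    · rw [if_neg hk]
      cases h : pvLookup row k with
      | none =>
        have hstep : pvInsertIfPresent row d k = d := by simp [pvInsertIfPresent, h]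
        rw [hstep, ih d hnd hval, List.filterMap_cons]
        simp only [h, Option.map_none]
        rw [pvDedupRel_drop_none row k h ks (k :: d.keys) d.keys (fun x => by simp [List.mem_cons])]
      | some v =>
        have hnc : d.contains k = false := by
          rcases hb : d.contains k with _ | _
          · rfl
          · exact absurd ((PySem.Dict.contains_iff_mem_keys d k).mp hb) hk
        have hstep : pvInsertIfPresent row d k = d.insert k v := by simp [pvInsertIfPresent, h]
        have hnd' : (d.insert k v).keys.Nodup := PySem.Dict.nodup_keys_insert d k v hnd
        have hval' : ∀ k' v', (d.insert k v).get? k' = some v' → pvLookup row k' = some v' := by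
          intro k' v' hg
          rw [PySem.Dict.get?_insert] at hg
          by_cases hk' : k' = k
          · rw [if_pos hk'] at hg; rw [hk', h, Option.some_inj.mp hg]
          · rw [if_neg hk'] at hg; exact hval k' v' hg
        rw [hstep, ih (d.insert k v) hnd' hval',
            PySem.Dict.items_insert_of_not_contains d v hnc,
            PySem.Dict.keys_insert_of_not_contains d v hnc,
            pvDedupRel_congr ks (d.keys ++ [k]) (k :: d.keys) (fun x => by simp [List.mem_cons, or_comm]),
            List.filterMap_cons]
        simp [h, List.append_assoc]

theorem pvD0_nodup (row : List (String × String)) : (pvD0 row).keys.Nodup := by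
  unfold pvD0
  cases pvLookup row "Platform" <;> simp [PySem.Dict.keys, PySem.Dict.insert, PySem.Dict.empty, PySem.Dict.contains]

theorem pvD0_val (row : List (String × String)) :
    ∀ k v, (pvD0 row).get? k = some v → pvLookup row k = some v := by
  intro k v h
  unfold pvD0 at h
  cases hp : pvLookup row "Platform" with
  | none => rw [hp] at h; rw [PySem.Dict.get?_empty] at h; cases h
  | some w =>
    rw [hp, PySem.Dict.get?_insert] at h
    by_cases hk : k = "Platform"
    · rw [if_pos hk] at h; rw [hk, hp]; rw [Option.some_inj.mp h]
    · rw [if_neg hk, PySem.Dict.get?_empty] at h; cases h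

-- A in the Homzmart branch computes exactly the pvOrder-driven filterMap
theorem pvA_eq (row : List (String × String)) :
    filter_columns_by_platform row "Homzmart"
      = pvOrder.filterMap (fun c => (pvLookup row c).map (fun v => (c, v))) := by
  have hA : filter_columns_by_platform row "Homzmart"
      = (pvK.foldl (pvInsertIfPresent row) (pvD0 row)).items := rfl
  rw [hA, pvMain row pvK (pvD0 row) (pvD0_nodup row) (pvD0_val row)]
  unfold pvD0 pvOrder
  rw [List.filterMap_cons]
  cases hp : pvLookup row "Platform" with
  | none =>
    have : pvDedupRel (PySem.Dict.empty : PySem.Dict String String).keys pvK = pvW := by decide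
    rw [this]
    simp [PySem.Dict.empty]
  | some v =>
    have hkeys : ((PySem.Dict.empty : PySem.Dict String String).insert "Platform" v).keys = ["Platform"] := rfl
    have hitems : ((PySem.Dict.empty : PySem.Dict String String).insert "Platform" v).items = [("Platform", v)] := rfl
    rw [hkeys, hitems]
    have : pvDedupRel ["Platform"] pvK = pvW := by decide
    rw [this]
    rfl

-- B-side facts about the constant rank table
theorem pvRanks_keys : (pvColumnRanks pvMapHomzmart).keys = pvOrder := by decide

theorem pvOrder_nodup : pvOrder.Nodup := by decide

theorem pvOrder_pairwise :
    pvOrder.Pairwise (fun a b =>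
      ((pvColumnRanks pvMapHomzmart).get? a).getD 0 < ((pvColumnRanks pvMapHomzmart).get? b).getD 0) := by
  decide

-- 'col in row' ↔ the lookup succeeds
theorem pvLookup_isSome (row : List (String × String)) (k : String) :
    (pvLookup row k).isSome = true ↔ k ∈ row.map Prod.fst := by
  unfold pvLookup
  rw [Option.isSome_map, List.find?_isSome]
  constructor
  · rintro ⟨p, hp, he⟩
    exact (eq_of_beq he) ▸ List.mem_map_of_mem hp (f := Prod.fst)
  · intro h
    rcases List.mem_map.mp h with ⟨p, hp, he⟩
    exact ⟨p, hp, by simp [he]⟩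

-- filterMap over lookups = map over the keys that are present
theorem pvFilterMap_eq_map (row : List (String × String)) : ∀ (l : List String),
    l.filterMap (fun c => (pvLookup row c).map (fun v => (c, v)))
      = (l.filter (fun c => (pvLookup row c).isSome)).map (fun k => (k, (pvLookup row k).getD "")) := by
  intro l
  induction l with
  | nil => rfl
  | cons c l ih =>
    rw [List.filterMap_cons, List.filter_cons]
    cases h : pvLookup row c with
    | none => simp [ih]
    | some v => simp [ih, h]

-- building a dict by inserting fresh distinct keys lists exactly those pairs
theorem pvFoldInsert (f : String → String) : ∀ (l : List String) (d : PySem.Dict String String),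
    l.Nodup → (∀ k ∈ l, d.contains k = false) →
    (l.foldl (fun d k => d.insert k (f k)) d).items = d.items ++ l.map (fun k => (k, f k)) := by
  intro l
  induction l with
  | nil => intro d _ _; simp
  | cons k l ih =>
    intro d hnd hfresh
    have hk : d.contains k = false := hfresh k (List.mem_cons_self ..)
    have hfresh' : ∀ k' ∈ l, (d.insert k (f k)).contains k' = false := by
      intro k' hk'
      rw [PySem.Dict.contains_insert]
      have hne : k' ≠ k := fun he => (List.nodup_cons.mp hnd).1 (he ▸ hk')
      simp [hne, hfresh k' (List.mem_cons_of_mem _ hk')]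
    rw [List.foldl_cons, List.map_cons,
        ih (d.insert k (f k)) (List.nodup_cons.mp hnd).2 hfresh',
        PySem.Dict.items_insert_of_not_contains d (f k) hk]
    simp [List.append_assoc]

-- B in the Homzmart branch computes the same pvOrder-driven filterMap
theorem pvB_eq (row : List (String × String)) :
    filter_columns_by_platform_alt row "Homzmart"
      = pvOrder.filterMap (fun c => (pvLookup row c).map (fun v => (c, v))) := by
  have hguard : ¬ ("Homzmart" = "" ∨ (pvMappings.find? (fun p => p.1 == "Homzmart")) = none) := by decide
  have hB : filter_columns_by_platform_alt row "Homzmart"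
      = ((PySem.List.sorted
            (PySem.Set.inter (PySem.Set.ofList (row.map Prod.fst)) (pvColumnRanks pvMapHomzmart).keys)
            (fun k => ((pvColumnRanks pvMapHomzmart).get? k).getD 0) false).foldl
          (fun d k => d.insert k ((pvLookup row k).getD "")) PySem.Dict.empty).items := by
    unfold filter_columns_by_platform_alt
    rw [if_neg hguard]
    rfl
  -- the sorted selection is pvOrder filtered to the row's keys
  set K := pvOrder.filter (fun c => (pvLookup row c).isSome) with hK
  have hsorted : PySem.List.sorted
      (PySem.Set.inter (PySem.Set.ofList (row.map Prod.fst)) (pvColumnRanks pvMapHomzmart).keys)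
      (fun k => ((pvColumnRanks pvMapHomzmart).get? k).getD 0) false = K := by
    apply PySem.List.sorted_eq_of_perm_of_pairwise_lt
    · -- K is a permutation of the set intersection: both have no duplicates and the same members
      have hndI : (PySem.Set.inter (PySem.Set.ofList (row.map Prod.fst)) (pvColumnRanks pvMapHomzmart).keys).Nodup := by
        exact List.Nodup.filter _ (PySem.Set.nodup_ofList _)
      have hndK : K.Nodup := List.Nodup.filter _ pvOrder_nodup
      refine (List.perm_ext_iff_of_nodup hndK hndI).mpr (fun c => ?_)
      unfold PySem.Set.inter
      rw [List.mem_filter, List.mem_filter, PySem.Set.mem_ofList, pvRanks_keys]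
      constructor
      · rintro ⟨h1, h2⟩
        exact ⟨(pvLookup_isSome row c).mp (by simpa using h2),
               by simpa [List.contains_iff_mem] using h1⟩
      · rintro ⟨h1, h2⟩
        have h2' : c ∈ pvOrder := by simpa [List.contains_iff_mem] using h2
        exact ⟨h2', by simpa using (pvLookup_isSome row c).mpr h1⟩
    · exact List.Pairwise.filter _ pvOrder_pairwise
  rw [hB, hsorted,
      pvFoldInsert (fun k => (pvLookup row k).getD "") K PySem.Dict.empty
        (List.Nodup.filter _ pvOrder_nodup) (fun k _ => rfl),
      pvFilterMap_eq_map row pvOrder]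
  simp [PySem.Dict.empty, hK]

-- ===== VERDICT (by name: the statement is the Claim_ definition above) =====
theorem filter_columns_by_platform_spec : Claim_equal_filter_columns_by_platform := by
  unfold Claim_equal_filter_columns_by_platform
  intro row platform _dom
  unfold Spec_filter_columns_by_platform
  by_cases hg : (platform = "" ∨ (pvMappings.find? (fun p => p.1 == platform)) = none)
  · simp only [filter_columns_by_platform, filter_columns_by_platform_alt, if_pos hg]
  · have hplat : platform = "Homzmart" := by
      by_cases hq : "Homzmart" = platform
      · exact hq.symm
      · exfalso
        exact hg (Or.inr (by simp [pvMappings, List.find?, hq]))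
    subst hplat
    rw [pvA_eq row, pvB_eq row]
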